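-- pv_equiv track=rewrite | github.com/carsanvel/TFT-Carlos-Sanchez | identificar_nombres.py | combinacion_valida
-- ===== SOURCE A (Python) =====
-- def combinacion_valida(comb):
--     checklist = [False, False, False]
--     posiciones = [[], [], []]
--     for i in range(len(comb)):
--         if comb[i] == 0:
--             checklist[0] = True
--             posiciones[0].append(i)
--         elif comb[i] == 1:
--             checklist[1] = True
--             posiciones[1].append(i)
--         else:
--             checklist[2] = True
--             posiciones[2].append(i)
--     if checklist[0] == False or checklist[1] == False:
--         return False
--     for i in range(len(posiciones)):
--         for j in range(len(posiciones[i])-1):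
--             if posiciones[i][j+1] - posiciones[i][j] > 1:
--                 return False
--     return True
-- ===== SOURCE B (Python) =====
-- def combinacion_valida(comb):
--     seen0 = False
--     seen1 = False
--     prev = None
--     completed = set()
--     for x in comb:
--         k = 0 if x == 0 else (1 if x == 1 else 2)
--         if k == 0:
--             seen0 = True
--         if k == 1:
--             seen1 = True
--         if prev is None:
--             prev = k
--         elif k != prev:
--             if k in completed:
--                 return False
--             completed.add(prev)
--             prev = k
--     return seen0 and seen1
-- ===== Notes on version B (the rewrite author's own statement) =====
-- stated objective: alternative
-- what changed: Replaces A's two-phase design (bucket all indices into three position lists, then scan each list for index gaps) by a single pass that tracks the previous key and a set of completed keys, rejecting as soon as a key reappears after an interruption; no position lists are built.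
import Mathlib
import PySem

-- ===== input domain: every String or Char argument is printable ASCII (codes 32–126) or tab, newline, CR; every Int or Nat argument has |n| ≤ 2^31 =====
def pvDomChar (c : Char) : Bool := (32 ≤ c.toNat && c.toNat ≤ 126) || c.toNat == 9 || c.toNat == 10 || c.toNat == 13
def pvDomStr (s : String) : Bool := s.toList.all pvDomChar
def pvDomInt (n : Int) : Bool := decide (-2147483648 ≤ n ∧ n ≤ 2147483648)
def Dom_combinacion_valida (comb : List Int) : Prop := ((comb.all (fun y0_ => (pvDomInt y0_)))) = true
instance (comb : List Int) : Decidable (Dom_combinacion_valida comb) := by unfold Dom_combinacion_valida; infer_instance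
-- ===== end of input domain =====

-- ===== PORT A =====
-- B replaces A's two-phase bucket-then-scan by a single pass (different algorithm; same O(n) cost class).
-- first loop of A: builds the checklist flags and the three position lists (indices appended in order)
def cvLoopA : List Int → Int → (Bool × Bool × Bool) → (List Int × List Int × List Int) →
    ((Bool × Bool × Bool) × (List Int × List Int × List Int))
  | [], _, ck, ps => (ck, ps)
  | x :: xs, i, (b0, b1, b2), (p0, p1, p2) =>
    if x = 0 then cvLoopA xs (i + 1) (true, b1, b2) (p0 ++ [i], p1, p2)
    else if x = 1 then cvLoopA xs (i + 1) (b0, true, b2) (p0, p1 ++ [i], p2)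
    else cvLoopA xs (i + 1) (b0, b1, true) (p0, p1, p2 ++ [i])

-- 'for j in range(len(l)-1): if l[j+1] - l[j] > 1: return False'
def gapsOkA (l : List Int) : Bool :=
  (List.range (l.length - 1)).all (fun j => !decide (l.getD (j + 1) 0 - l.getD j 0 > 1))

def combinacion_valida (comb : List Int) : Bool :=
  let st := cvLoopA comb 0 (false, false, false) ([], [], [])
  if st.1.1 = false || st.1.2.1 = false then false
  else gapsOkA st.2.1 && gapsOkA st.2.2.1 && gapsOkA st.2.2.2

-- ===== PORT B =====
-- k = 0 if x == 0 else (1 if x == 1 else 2)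
def cvKey (x : Int) : Int := if x = 0 then 0 else if x = 1 then 1 else 2

-- single pass: previous block key, set of completed block keys, presence flags
def cvLoopB : List Int → Bool → Bool → Option Int → PySem.Set Int → Bool
  | [], seen0, seen1, _, _ => seen0 && seen1
  | x :: xs, seen0, seen1, prev, completed =>
    let k := cvKey x
    let seen0 := if k = 0 then true else seen0
    let seen1 := if k = 1 then true else seen1
    match prev with
    | none => cvLoopB xs seen0 seen1 (some k) completed
    | some p =>
      if k ≠ p then
        if PySem.Set.contains completed k then false
        else cvLoopB xs seen0 seen1 (some k) (PySem.Set.add completed p)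
      else cvLoopB xs seen0 seen1 (some k) completed

def combinacion_valida_alt (comb : List Int) : Bool :=
  cvLoopB comb false false none PySem.Set.empty

-- ===== PRECONDITION & SPEC =====
def Spec_combinacion_valida (comb : List Int) (out : Bool) : Prop := out = combinacion_valida_alt comb
instance (comb : List Int) (out : Bool) : Decidable (Spec_combinacion_valida comb out) := by unfold Spec_combinacion_valida; infer_instance

-- ===== CLAIM (what is proved, stated in full; the proofs are below) =====
def Claim_equal_combinacion_valida : Prop := ∀ (comb : List Int), Dom_combinacion_valida comb → Spec_combinacion_valida comb (combinacion_valida comb)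

-- ===== LEMMAS AND PROOFS =====

-- Boolean membership
def memB (v : Int) : List Int → Bool
  | [] => false
  | x :: xs => (x == v) || memB v xs

-- positions (starting at index i) at which the key equals v
def posRec (v : Int) : List Int → Int → List Int
  | [], _ => []
  | k :: ks, i => if k = v then i :: posRec v ks (i + 1) else posRec v ks (i + 1)

-- adjacent-gap check, structurally
def chainB : List Int → Bool
  | [] => true
  | [_] => true
  | a :: b :: t => decide (b - a ≤ 1) && chainB (b :: t)

-- contiguity automaton, state "currently inside a run of v"
def contigIR (v : Int) : List Int → Bool
  | [] => true
  | k :: ks => if k = v then contigIR v ks else !memB v ks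

-- contiguity automaton, state "v not yet seen"
def contigNS (v : Int) : List Int → Bool
  | [] => true
  | k :: ks => if k = v then contigIR v ks else contigNS v ks

-- no block key repeats after an interruption, starting inside a run of p
def noRep (p : Int) : List Int → Bool
  | [] => true
  | x :: xs => if x = p then noRep p xs else !memB p xs && noRep x xs

theorem cvKey_cases (x : Int) : cvKey x = 0 ∨ cvKey x = 1 ∨ cvKey x = 2 := by
  unfold cvKey; split_ifs <;> simp

theorem keyList_map (xs : List Int) : ∀ y ∈ xs.map cvKey, y = 0 ∨ y = 1 ∨ y = 2 := by
  intro y hy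
  rcases List.mem_map.mp hy with ⟨x, _, rfl⟩
  exact cvKey_cases x

theorem posRec_ge (v : Int) (ks : List Int) (i p : Int) (h : p ∈ posRec v ks i) : i ≤ p := by
  induction ks generalizing i with
  | nil => simp [posRec] at h
  | cons k ks ih =>
    simp only [posRec] at h
    split at h
    · rcases List.mem_cons.mp h with h | h
      · omega
      · have := ih (i + 1) h; omega
    · have := ih (i + 1) h; omega

theorem posRec_nil_iff (v : Int) (ks : List Int) (i : Int) :
    posRec v ks i = [] ↔ memB v ks = false := by
  induction ks generalizing i with
  | nil => simp [posRec, memB]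
  | cons k ks ih =>
    simp only [posRec, memB]
    split
    · rename_i h; simp [h]
    · rename_i h
      rw [ih (i + 1)]
      have : (k == v) = false := by simp [h]
      simp [this]

theorem memB_absent_contigNS (v : Int) (ks : List Int) (h : memB v ks = false) :
    contigNS v ks = true := by
  induction ks with
  | nil => rfl
  | cons k ks ih =>
    simp only [memB, Bool.or_eq_false_iff, beq_eq_false_iff_ne] at h
    simp [contigNS, h.1, ih h.2]

-- the A-side characterisation: chain-of-gaps on the positions = contiguity automaton
theorem chain_posRec (v : Int) (ks : List Int) (i : Int) :
    chainB (posRec v ks i) = contigNS v ks ∧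
    chainB ((i - 1) :: posRec v ks i) = contigIR v ks := by
  induction ks generalizing i with
  | nil => simp [posRec, chainB, contigNS, contigIR]
  | cons k ks ih =>
    by_cases hk : k = v
    · subst hk
      have hpr : posRec k (k :: ks) i = i :: posRec k ks (i + 1) := by simp [posRec]
      have h2 := (ih (i + 1)).2
      have hi : i + 1 - 1 = i := by omega
      rw [hi] at h2
      refine ⟨?_, ?_⟩
      · rw [hpr, show contigNS k (k :: ks) = contigIR k ks from by simp [contigNS], h2]
      · rw [hpr, show contigIR k (k :: ks) = contigIR k ks from by simp [contigIR]]
        rw [show chainB ((i - 1) :: i :: posRec k ks (i + 1)) =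
              (decide (i - (i - 1) ≤ 1) && chainB (i :: posRec k ks (i + 1))) from rfl]
        rw [h2, show decide (i - (i - 1) ≤ 1) = true from by simp, Bool.true_and]
    · have hpr : posRec v (k :: ks) i = posRec v ks (i + 1) := by simp [posRec, hk]
      have h1 := (ih (i + 1)).1
      refine ⟨?_, ?_⟩
      · rw [hpr, show contigNS v (k :: ks) = contigNS v ks from by simp [contigNS, hk], h1]
      · rw [hpr, show contigIR v (k :: ks) = !memB v ks from by simp [contigIR, hk]]
        rcases hpos : posRec v ks (i + 1) with _ | ⟨p, rest⟩
        · have hm : memB v ks = false := (posRec_nil_iff v ks (i + 1)).mp hpos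
          rw [hm]; rfl
        · have hp : i + 1 ≤ p := posRec_ge v ks (i + 1) p (by rw [hpos]; exact List.mem_cons_self ..)
          have hmem : memB v ks = true := by
            cases h : memB v ks
            · rw [(posRec_nil_iff v ks (i + 1)).mpr h] at hpos; cases hpos
            · rfl
          rw [show chainB ((i - 1) :: p :: rest) =
                (decide (p - (i - 1) ≤ 1) && chainB (p :: rest)) from rfl]
          rw [show decide (p - (i - 1) ≤ 1) = false from by rw [decide_eq_false_iff_not]; omega]
          rw [hmem, Bool.false_and]; rfl

-- port A's indexed gap check equals the structural chain
theorem allCongr {A : Type} (l : List A) (f g : A → Bool) (h : ∀ x ∈ l, f x = g x) :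
    l.all f = l.all g := by
  induction l with
  | nil => rfl
  | cons x xs ih =>
    simp only [List.all_cons, h x (List.mem_cons_self ..),
      ih fun y hy => h y (List.mem_cons_of_mem _ hy)]

theorem gapsOkA_eq_chainB (l : List Int) : gapsOkA l = chainB l := by
  induction l with
  | nil => rfl
  | cons a t ih =>
    cases t with
    | nil => rfl
    | cons b t2 =>
      show gapsOkA (a :: b :: t2) = (decide (b - a ≤ 1) && chainB (b :: t2))
      unfold gapsOkA
      rw [show (a :: b :: t2 : List Int).length - 1 = t2.length + 1 from by simp]
      rw [List.range_succ_eq_map, List.all_cons, List.all_map]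
      refine congrArg₂ (· && ·) ?_ ?_
      · simp only [Nat.zero_add, List.getD_cons_succ, List.getD_cons_zero]
        by_cases h : b - a ≤ 1
        · simp [h, show ¬(b - a > 1) from by omega]
        · simp [h, show b - a > 1 from by omega]
      · rw [← ih]
        unfold gapsOkA
        rw [show (b :: t2 : List Int).length - 1 = t2.length from by simp]
        apply allCongr
        intro j _
        simp only [Function.comp, Nat.succ_eq_add_one, List.getD_cons_succ]

-- unfolding the first loop of A
theorem cvLoopA_spec (xs : List Int) (i : Int) (b0 b1 b2 : Bool) (p0 p1 p2 : List Int) :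
    cvLoopA xs i (b0, b1, b2) (p0, p1, p2) =
      ((b0 || memB 0 (xs.map cvKey), b1 || memB 1 (xs.map cvKey), b2 || memB 2 (xs.map cvKey)),
       (p0 ++ posRec 0 (xs.map cvKey) i, p1 ++ posRec 1 (xs.map cvKey) i,
        p2 ++ posRec 2 (xs.map cvKey) i)) := by
  induction xs generalizing i b0 b1 b2 p0 p1 p2 with
  | nil => simp [cvLoopA, memB, posRec]
  | cons x xs ih =>
    by_cases h0 : x = 0
    · have hk : cvKey x = 0 := by simp [cvKey, h0]
      simp only [cvLoopA, if_pos h0, List.map_cons, ih, hk]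
      simp [memB, posRec]
    · by_cases h1 : x = 1
      · have hk : cvKey x = 1 := by simp [cvKey, h0, h1]
        simp only [cvLoopA, if_neg h0, if_pos h1, List.map_cons, ih, hk]
        simp [memB, posRec]
      · have hk : cvKey x = 2 := by simp [cvKey, h0, h1]
        simp only [cvLoopA, if_neg h0, if_neg h1, List.map_cons, ih, hk]
        simp [memB, posRec]

-- B-side loop invariant: completed keys must never reappear; the current run continues via noRep
theorem cvLoopB_spec (xs : List Int) (s0 s1 : Bool) (p : Int) (C : PySem.Set Int)
    (hp : PySem.Set.contains C p = false) :
    cvLoopB xs s0 s1 (some p) C =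
      ((s0 || memB 0 (xs.map cvKey)) && (s1 || memB 1 (xs.map cvKey)) &&
       C.all (fun v => !memB v (xs.map cvKey)) && noRep p (xs.map cvKey)) := by
  induction xs generalizing s0 s1 p C with
  | nil => simp [cvLoopB, memB, noRep]
  | cons x xs ih =>
    have hpC : p ∉ C := fun h => by
      rw [← PySem.Set.contains_iff C p] at h; rw [hp] at h; cases h
    simp only [cvLoopB, List.map_cons]
    by_cases hkp : cvKey x = p
    · rw [if_neg (by simp [hkp])]
      rw [hkp]
      rw [ih _ _ _ _ hp]
      have hCall : (C.all fun v => !memB v (p :: xs.map cvKey)) =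
          (C.all fun v => !memB v (xs.map cvKey)) := by
        apply allCongr
        intro v hv
        have hne : (p == v) = false := by
          simp only [beq_eq_false_iff_ne]
          intro h; exact hpC (h ▸ hv)
        simp [memB, hne]
      rw [hCall, show noRep p (p :: xs.map cvKey) = noRep p (xs.map cvKey) from by simp [noRep]]
      rw [show memB 0 (p :: xs.map cvKey) = ((p == 0) || memB 0 (xs.map cvKey)) from rfl,
          show memB 1 (p :: xs.map cvKey) = ((p == 1) || memB 1 (xs.map cvKey)) from rfl]
      by_cases h0 : p = 0
      · subst h0
        simp [Bool.or_assoc, Bool.or_comm, Bool.or_left_comm]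
      · by_cases h1 : p = 1
        · subst h1
          simp [Bool.or_assoc, Bool.or_comm, Bool.or_left_comm]
        · have e0 : (p == 0) = false := by simp [h0]
          have e1 : (p == 1) = false := by simp [h1]
          simp [h0, h1, e0, e1]
    · rw [if_pos (by simp [hkp])]
      by_cases hC : PySem.Set.contains C (cvKey x) = true
      · rw [if_pos hC]
        have hall : (C.all fun v => !memB v (cvKey x :: xs.map cvKey)) = false := by
          apply List.all_eq_false.mpr
          refine ⟨cvKey x, (PySem.Set.contains_iff _ _).mp hC, ?_⟩
          simp [memB]
        rw [hall]; simp
      · rw [if_neg hC]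
        have hkC : cvKey x ∉ C := fun h => hC ((PySem.Set.contains_iff _ _).mpr h)
        have hp' : PySem.Set.contains (PySem.Set.add C p) (cvKey x) = false := by
          cases h : PySem.Set.contains (PySem.Set.add C p) (cvKey x)
          · rfl
          · exfalso
            rcases (PySem.Set.mem_add _ _ _).mp ((PySem.Set.contains_iff _ _).mp h) with h' | h'
            · exact hkC h'
            · exact hkp h'
        rw [ih _ _ _ _ hp']
        have hadd : PySem.Set.add C p = C ++ [p] := PySem.Set.add_of_not_mem hpC
        have hCall : ((PySem.Set.add C p).all fun v => !memB v (xs.map cvKey)) =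
            ((C.all fun v => !memB v (cvKey x :: xs.map cvKey)) && !memB p (xs.map cvKey)) := by
          rw [hadd, List.all_append]
          congr 1
          · apply allCongr
            intro v hv
            have hne : (cvKey x == v) = false := by
              simp only [beq_eq_false_iff_ne]
              intro h; exact hkC (h ▸ hv)
            simp [memB, hne]
          · simp [List.all, memB]
        rw [hCall]
        rw [show noRep p (cvKey x :: xs.map cvKey) =
              (!memB p (xs.map cvKey) && noRep (cvKey x) (xs.map cvKey)) from by simp [noRep, hkp]]
        rw [show memB 0 (cvKey x :: xs.map cvKey) = ((cvKey x == 0) || memB 0 (xs.map cvKey)) from rfl,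
            show memB 1 (cvKey x :: xs.map cvKey) = ((cvKey x == 1) || memB 1 (xs.map cvKey)) from rfl]
        by_cases h0 : cvKey x = 0
        · rw [h0]
          cases s0 <;> cases s1 <;> cases memB 0 (xs.map cvKey) <;> cases memB 1 (xs.map cvKey) <;>
            cases memB p (xs.map cvKey) <;>
            cases (C.all fun v => !memB v ((0 : Int) :: xs.map cvKey)) <;>
            cases noRep (0 : Int) (xs.map cvKey) <;> simp
        · by_cases h1 : cvKey x = 1
          · rw [h1]
            cases s0 <;> cases s1 <;> cases memB 0 (xs.map cvKey) <;> cases memB 1 (xs.map cvKey) <;>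
              cases memB p (xs.map cvKey) <;>
              cases (C.all fun v => !memB v ((1 : Int) :: xs.map cvKey)) <;>
              cases noRep (1 : Int) (xs.map cvKey) <;> simp
          · rw [if_neg h0, if_neg h1]
            have e0 : (cvKey x == 0) = false := by simp [h0]
            have e1 : (cvKey x == 1) = false := by simp [h1]
            rw [e0, e1]
            cases s0 <;> cases s1 <;> cases memB 0 (xs.map cvKey) <;> cases memB 1 (xs.map cvKey) <;>
              cases memB p (xs.map cvKey) <;>
              cases (C.all fun v => !memB v (cvKey x :: xs.map cvKey)) <;>
              cases noRep (cvKey x) (xs.map cvKey) <;> simp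

-- bridge between the three per-key automata and noRep
theorem noRep_bridge (ks : List Int) (p : Int)
    (hks : ∀ y ∈ ks, y = 0 ∨ y = 1 ∨ y = 2) (hp : p = 0 ∨ p = 1 ∨ p = 2) :
    noRep p ks = (contigIR p ks &&
      ((p == 0 || contigNS 0 ks) && (p == 1 || contigNS 1 ks) && (p == 2 || contigNS 2 ks))) := by
  induction ks generalizing p with
  | nil => simp [noRep, contigIR, contigNS]
  | cons x xs ih =>
    have hx := hks x (List.mem_cons_self ..)
    have hxs : ∀ y ∈ xs, y = 0 ∨ y = 1 ∨ y = 2 := fun y hy => hks y (List.mem_cons_of_mem _ hy)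
    by_cases hxp : x = p
    · subst hxp
      rw [show noRep x (x :: xs) = noRep x xs by simp [noRep]]
      rw [ih x hxs hx]
      rcases hx with rfl | rfl | rfl <;> simp [contigIR, contigNS]
    · rw [show noRep p (x :: xs) = (!memB p xs && noRep x xs) by simp [noRep, hxp]]
      rw [ih x hxs hx]
      cases hm : memB p xs
      · have hNS := memB_absent_contigNS p xs hm
        rcases hp with rfl | rfl | rfl <;> rcases hx with rfl | rfl | rfl <;>
          first
          | (exact absurd rfl hxp)
          | (simp [contigIR, contigNS, hxp, hm, hNS, Bool.and_assoc, Bool.and_comm, Bool.and_left_comm])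
      · rcases hp with rfl | rfl | rfl <;> rcases hx with rfl | rfl | rfl <;>
          first
          | (exact absurd rfl hxp)
          | (simp [contigIR, contigNS, hxp, hm])

-- ===== VERDICT (by name: the statement is the Claim_ definition above) =====
theorem combinacion_valida_spec : Claim_equal_combinacion_valida := by
  intro comb _
  unfold Spec_combinacion_valida
  cases comb with
  | nil => rfl
  | cons x xs =>
    have hA : combinacion_valida (x :: xs) =
        (if (false || memB 0 ((x :: xs).map cvKey)) = false ||
            (false || memB 1 ((x :: xs).map cvKey)) = false then false
         else gapsOkA ([] ++ posRec 0 ((x :: xs).map cvKey) 0) &&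
              gapsOkA ([] ++ posRec 1 ((x :: xs).map cvKey) 0) &&
              gapsOkA ([] ++ posRec 2 ((x :: xs).map cvKey) 0)) := by
      unfold combinacion_valida
      rw [cvLoopA_spec]
    rw [hA]
    simp only [List.nil_append, Bool.false_or, gapsOkA_eq_chainB]
    rw [(chain_posRec 0 ((x :: xs).map cvKey) 0).1,
        (chain_posRec 1 ((x :: xs).map cvKey) 0).1,
        (chain_posRec 2 ((x :: xs).map cvKey) 0).1]
    have hB : combinacion_valida_alt (x :: xs) =
        cvLoopB xs (if cvKey x = 0 then true else false) (if cvKey x = 1 then true else false)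
          (some (cvKey x)) PySem.Set.empty := by
      unfold combinacion_valida_alt
      simp [cvLoopB]
    rw [hB, cvLoopB_spec _ _ _ _ _ rfl]
    have hall : (PySem.Set.empty.all fun v => !memB v (xs.map cvKey)) = true := rfl
    rw [hall]
    rw [noRep_bridge (xs.map cvKey) (cvKey x) (keyList_map xs) (cvKey_cases x)]
    rcases cvKey_cases x with hk | hk | hk <;>
      · rw [hk]
        simp only [List.map_cons, hk, memB, contigNS, reduceIte]
        cases memB 0 (xs.map cvKey) <;> cases memB 1 (xs.map cvKey) <;>
          cases memB 2 (xs.map cvKey) <;>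
          simp [Bool.and_assoc, Bool.and_comm, Bool.and_left_comm]
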